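-- pv_equiv track=rewrite | github.com/dantealegria1/4to_Semestre | Programacion_cientifica/Complemeto_2.py | complemento_1
-- ===== SOURCE A (Python) =====
-- def convertir_a_binario(numero):
--     binario = ''
--     if numero < 0:
--         numero = abs(numero)
--     while numero > 0:
--         binario = str(numero % 2) + binario
--         numero = numero // 2
--     #La diferencia es que ahora lo llenamos con ceros a
--     #  la izquierda para que sea de 8 bits
--     for i in range (8-len(binario)):
--         binario = '0' + binario
--     return binario
--
-- def complemento_1(numero):
--     #Lo convertimos a binario
--     binario = convertir_a_binario(numero)
--     #creamos el complemento
--     complemento = ''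
--     #Si es positivo, solo invertimos los bits
--     if numero > 0:
--         for i in range(len(binario)):
--             if binario[i] == '0':
--                 complemento = complemento + '1'
--             else:
--                 complemento = complemento + '0'
--         #sumamos 1 al complemento de manea binaria
--         #por eso ponemos el 2 en la funcion
--         complemento = int(complemento, 2) + 1
--         #lo convertimos a binario
--         complemento = convertir_a_binario(complemento)
--     else:
--         #Si es negativo, lo convertimos a positivo
--         #El abs es de absolute value
--         numero = abs(numero-1)
--         #lo convertimos a binario
--         complemento = convertir_a_binario(numero)
--         #Diferencia es que en vez de sumar le restamos uno, por que
--         #el numero es negativo es igual a el numero binario de n+1 volteado lol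
--         complemento = int(complemento, 2) - 1
--         complemento = convertir_a_binario(complemento)
--     return complemento
-- ===== SOURCE B (Python) =====
-- def complemento_1(numero):
--     # closed-form: nonpositive -> magnitude in 8-bit padding; positive -> two's complement 2**L - n
--     if numero <= 0:
--         return format(abs(numero), '08b')
--     L = max(8, numero.bit_length())
--     return format(2 ** L - numero, '08b')
-- ===== Notes on version B (the rewrite author's own statement) =====
-- stated objective: simpler
-- what changed: Replaced the digit-by-digit binary-string building, bit-inversion loop and binary re-parsing with closed-form arithmetic (two to the power max(8, bit_length) minus n for positive n, abs(n) otherwise), formatted once with format(.., '08b').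
import Mathlib
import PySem

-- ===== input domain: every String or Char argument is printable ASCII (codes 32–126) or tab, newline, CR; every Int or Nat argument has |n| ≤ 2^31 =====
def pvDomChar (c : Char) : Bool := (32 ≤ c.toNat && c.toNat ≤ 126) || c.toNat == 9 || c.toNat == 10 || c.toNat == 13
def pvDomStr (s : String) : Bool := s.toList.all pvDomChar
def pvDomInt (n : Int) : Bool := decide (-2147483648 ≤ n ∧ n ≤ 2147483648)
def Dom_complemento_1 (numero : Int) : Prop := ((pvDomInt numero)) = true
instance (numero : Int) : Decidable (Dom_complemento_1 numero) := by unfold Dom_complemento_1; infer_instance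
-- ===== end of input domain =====

-- B replaces A's digit-loop string building, bit-inversion loop and binary re-parsing with
-- closed-form arithmetic (2^L - n for positive n, |n| otherwise) formatted once; objective: simpler.


-- ===== PORT A =====
-- while numero > 0: binario = str(numero % 2) + binario; numero = numero // 2
def pvConvLoop (numero : Int) (binario : List Char) : List Char :=
  if numero > 0 then
    pvConvLoop (PySem.Int.floordiv numero 2) (PySem.Int.toChars (PySem.Int.mod numero 2) ++ binario)
  else binario
termination_by numero.toNat
decreasing_by
  rw [PySem.Int.floordiv_eq_ediv_of_pos (by omega)]
  omega

def convertir_a_binario (numero : Int) : List Char :=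
  let n := if numero < 0 then |numero| else numero
  let binario := pvConvLoop n []
  -- for i in range(8 - len(binario)): binario = '0' + binario
  List.replicate (8 - binario.length) '0' ++ binario

-- int(s, 2): hand port as a left fold; exact for the nonempty '0'/'1'-digit strings
-- that convertir_a_binario produces (the only strings that reach it in A).
def pvInt2 (cs : List Char) : Int :=
  cs.foldl (fun acc c => acc * 2 + (if c = '1' then 1 else 0)) 0

def complemento_1 (numero : Int) : String :=
  let binario := convertir_a_binario numero
  if numero > 0 then
    -- for i in range(len(binario)): complemento += '1'/'0'
    let complemento := binario.foldl (fun acc c => acc ++ [if c = '0' then '1' else '0']) []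
    let v := pvInt2 complemento + 1
    String.ofList (convertir_a_binario v)
  else
    let n := |numero - 1|
    let v := pvInt2 (convertir_a_binario n) - 1
    String.ofList (convertir_a_binario v)

-- ===== PORT B =====
-- binary digits of a natural number, most significant first (empty for 0)
def pvBinDigits (n : Nat) : List Char :=
  if n = 0 then [] else pvBinDigits (n / 2) ++ [if n % 2 = 1 then '1' else '0']

-- format(x, '08b'): zero-pad on the left to width 8
def pvPad8 (b : List Char) : String := String.ofList (List.replicate (8 - b.length) '0' ++ b)

def complemento_1_alt (numero : Int) : String :=
  if numero ≤ 0 then pvPad8 (pvBinDigits numero.natAbs)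
  else
    let L := max 8 (PySem.Int.bitLength numero)   -- max(8, numero.bit_length())
    pvPad8 (pvBinDigits (2 ^ L - numero.toNat))

-- ===== PRECONDITION & SPEC =====
def Spec_complemento_1 (numero : Int) (out : String) : Prop := out = complemento_1_alt numero
instance (numero : Int) (out : String) : Decidable (Spec_complemento_1 numero out) := by unfold Spec_complemento_1; infer_instance

-- ===== CLAIM (what is proved, stated in full; the proofs are below) =====
def Claim_equal_complemento_1 : Prop := ∀ (numero : Int), Dom_complemento_1 numero → Spec_complemento_1 numero (complemento_1 numero)

-- ===== LEMMAS AND PROOFS =====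

theorem pvConvLoop_eq (n : Nat) : ∀ b, pvConvLoop (n : Int) b = pvBinDigits n ++ b := by
  induction n using Nat.strong_induction_on with
  | _ n ih =>
    intro b
    rw [pvConvLoop, pvBinDigits]
    by_cases h0 : n = 0
    · simp [h0]
    · have hpos : (0:Int) < (n:Int) := by omega
      rw [if_pos hpos, if_neg h0]
      have hm : PySem.Int.mod (n : Int) 2 = ((n % 2 : Nat) : Int) := by
        exact_mod_cast PySem.Int.mod_natCast n 2
      have hdv : PySem.Int.floordiv (n : Int) 2 = ((n / 2 : Nat) : Int) := by
        exact_mod_cast PySem.Int.floordiv_natCast n 2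
      rw [hm, hdv, ih (n / 2) (by omega)]
      rcases Nat.mod_two_eq_zero_or_one n with h2 | h2 <;>
        rw [h2] <;>
        simp [show PySem.Int.toChars (0:Int) = ['0'] from by decide,
          show PySem.Int.toChars (1:Int) = ['1'] from by decide]

theorem convertir_eq (numero : Int) :
    convertir_a_binario numero =
      List.replicate (8 - (pvBinDigits numero.natAbs).length) '0' ++ pvBinDigits numero.natAbs := by
  have h : (if numero < 0 then |numero| else numero) = (numero.natAbs : Int) := by
    by_cases hn : numero < 0
    · rw [if_pos hn, abs_of_neg hn]; omega
    · rw [if_neg hn]; omega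
  simp only [convertir_a_binario, h, pvConvLoop_eq, List.append_nil]

theorem pvBinDigits_lt (n : Nat) : n < 2 ^ (pvBinDigits n).length := by
  induction n using Nat.strong_induction_on with
  | _ n ih =>
    rw [pvBinDigits]
    by_cases h0 : n = 0
    · simp [h0]
    · have := ih (n / 2) (by omega)
      simp only [h0, if_neg, not_false_iff, List.length_append, List.length_singleton]
      rw [pow_succ]
      omega

theorem pvBinDigits_len (n : Nat) (h : 0 < n) :
    (pvBinDigits n).length = PySem.Int.bitLength (n : Int) := by
  induction n using Nat.strong_induction_on with
  | _ n ih =>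
    rw [pvBinDigits, if_neg (by omega : ¬ n = 0),
      PySem.Int.bitLength_natCast h, List.length_append, List.length_singleton]
    by_cases h2 : n / 2 = 0
    · rw [h2]
      simp [pvBinDigits, PySem.Int.bitLength_zero]
    · rw [ih (n / 2) (by omega) (by omega)]

theorem pvBinDigits_chars (n : Nat) : ∀ c ∈ pvBinDigits n, c = '0' ∨ c = '1' := by
  induction n using Nat.strong_induction_on with
  | _ n ih =>
    intro c hc
    rw [pvBinDigits] at hc
    by_cases h0 : n = 0
    · simp [h0] at hc
    · rw [if_neg h0] at hc
      rcases List.mem_append.mp hc with hc | hc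
      · exact ih (n / 2) (by omega) c hc
      · rw [List.mem_singleton] at hc; subst hc; split <;> simp

theorem pvFoldl_shift (l : List Char) (a : Int) :
    l.foldl (fun acc c => acc * 2 + (if c = '1' then 1 else 0)) a
      = a * 2 ^ l.length +
        l.foldl (fun acc c => acc * 2 + (if c = '1' then 1 else 0)) 0 := by
  induction l generalizing a with
  | nil => simp
  | cons c t ih =>
    rw [List.foldl_cons, List.foldl_cons, ih (a * 2 + _), ih (0 * 2 + _), List.length_cons]
    ring

theorem pvInt2_cons (c : Char) (l : List Char) :
    pvInt2 (c :: l) = (if c = '1' then 1 else 0) * 2 ^ l.length + pvInt2 l := by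
  unfold pvInt2
  rw [List.foldl_cons, pvFoldl_shift]
  norm_num

theorem pvInt2_binDigits (n : Nat) : pvInt2 (pvBinDigits n) = n := by
  induction n using Nat.strong_induction_on with
  | _ n ih =>
    rw [pvBinDigits]
    by_cases h0 : n = 0
    · simp [h0, pvInt2]
    · rw [if_neg h0]
      unfold pvInt2
      rw [List.foldl_append]
      rw [show (pvBinDigits (n / 2)).foldl
            (fun acc c => acc * 2 + (if c = '1' then 1 else 0)) 0
          = pvInt2 (pvBinDigits (n / 2)) from rfl, ih (n / 2) (by omega)]
      rcases Nat.mod_two_eq_zero_or_one n with h2 | h2 <;> simp [h2] <;> omega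

theorem pvInt2_replicate (k : Nat) (s : List Char) :
    pvInt2 (List.replicate k '0' ++ s) = pvInt2 s := by
  induction k with
  | zero => simp
  | succ k ih => simpa [pvInt2, List.replicate_succ] using ih

theorem pvInvFold (b : List Char) : ∀ acc : List Char,
    b.foldl (fun acc c => acc ++ [if c = '0' then '1' else '0']) acc
      = acc ++ b.map (fun c => if c = '0' then '1' else '0') := by
  induction b with
  | nil => simp
  | cons c t ih => intro acc; simp [ih, List.append_assoc]

theorem pvInt2_inv (b : List Char) (h : ∀ c ∈ b, c = '0' ∨ c = '1') :
    pvInt2 (b.map fun c => if c = '0' then '1' else '0') + pvInt2 b = 2 ^ b.length - 1 := by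
  induction b with
  | nil => simp [pvInt2]
  | cons c t ih =>
    have ht := ih (fun x hx => h x (List.mem_cons_of_mem _ hx))
    have hP : (0:Int) < 2 ^ t.length := by positivity
    rw [List.map_cons, pvInt2_cons, pvInt2_cons, List.length_map, List.length_cons, pow_succ]
    rcases h c (List.mem_cons_self) with hc | hc <;> subst hc <;>
      split_ifs <;> simp_all <;> linarith

theorem pad_length (b : List Char) :
    (List.replicate (8 - b.length) '0' ++ b).length = max 8 b.length := by
  simp [List.length_append]; omega

theorem pad_chars (b : List Char) (h : ∀ c ∈ b, c = '0' ∨ c = '1') :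
    ∀ c ∈ List.replicate (8 - b.length) '0' ++ b, c = '0' ∨ c = '1' := by
  intro c hc
  rcases List.mem_append.mp hc with hc | hc
  · exact Or.inl (List.eq_of_mem_replicate hc)
  · exact h c hc

-- ===== VERDICT (by name: the statement is the Claim_ definition above) =====
theorem complemento_1_spec : Claim_equal_complemento_1 := by
  intro numero _
  unfold Spec_complemento_1 complemento_1 complemento_1_alt
  by_cases hpos : numero > 0
  · -- positive branch
    simp only [if_pos hpos, if_neg (not_le.mpr hpos)]
    set n := numero.natAbs with hn
    have hn0 : 0 < n := by omega
    have hnum : numero = (n : Int) := by omega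
    set d := pvBinDigits n with hd
    have hconv : convertir_a_binario numero = List.replicate (8 - d.length) '0' ++ d := by
      rw [convertir_eq]
    set pd := List.replicate (8 - d.length) '0' ++ d with hpd
    have hlen : pd.length = max 8 d.length := pad_length d
    have hinv : pd.foldl (fun acc c => acc ++ [if c = '0' then '1' else '0']) []
        = pd.map (fun c => if c = '0' then '1' else '0') := by
      simpa using pvInvFold pd []
    have hval : pvInt2 pd = (n : Int) := by
      rw [hpd, pvInt2_replicate, hd, pvInt2_binDigits]
    have hiv : pvInt2 (pd.map fun c => if c = '0' then '1' else '0')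
        = 2 ^ pd.length - 1 - n := by
      have := pvInt2_inv pd (pad_chars d (pvBinDigits_chars n))
      rw [hval] at this
      linarith
    have hnlt : n < 2 ^ pd.length := by
      calc n < 2 ^ d.length := pvBinDigits_lt n
        _ ≤ 2 ^ pd.length := Nat.pow_le_pow_right (by norm_num) (by omega)
    have hcast : (((2 : Nat) ^ pd.length : Nat) : Int) = 2 ^ pd.length := by push_cast; ring
    have hvnat : (pvInt2 (pd.map fun c => if c = '0' then '1' else '0') + 1).natAbs
        = 2 ^ pd.length - n := by
      rw [hiv]
      omega
    have hL : max 8 (PySem.Int.bitLength numero) = max 8 d.length := by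
      rw [hnum, hd, pvBinDigits_len n hn0]
    have htoNat : numero.toNat = n := by omega
    rw [hconv, hinv, convertir_eq, hvnat, pvPad8, hL, htoNat, ← hlen]
  · -- nonpositive branch
    have hle : numero ≤ 0 := by omega
    simp only [if_neg hpos, if_pos hle]
    set m := numero.natAbs with hm
    have habs : |numero - 1| = ((m + 1 : Nat) : Int) := by
      rw [abs_of_nonpos (by omega : numero - 1 ≤ 0)]; push_cast; omega
    have hval : pvInt2 (convertir_a_binario |numero - 1|) = ((m + 1 : Nat) : Int) := by
      rw [habs, convertir_eq, pvInt2_replicate]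
      rw [show ((m + 1 : Nat) : Int).natAbs = m + 1 by omega]
      rw [pvInt2_binDigits]
    rw [hval, convertir_eq, show (((m + 1 : Nat) : Int) - 1).natAbs = m by omega, pvPad8]
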